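-- pv_equiv track=rewrite | github.com/rudidev08/x4-foundations-version-diff | src/lib/file_level.py | _head_by_budget
-- ===== SOURCE A (Python) =====
-- def _head_by_budget(lines: list[str], budget_bytes: int) -> str:
--     out = []
--     used = 0
--     for line in lines:
--         b = len(line.encode('utf-8'))
--         if used + b > budget_bytes and out:
--             break
--         out.append(line)
--         used += b
--     return ''.join(out)
-- ===== SOURCE B (Python) =====
-- from bisect import bisect_right
-- from itertools import accumulate
--
--
-- def _head_by_budget(lines: list[str], budget_bytes: int) -> str:
--     prefix = list(accumulate(len(line.encode("utf-8")) for line in lines))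
--     count = max(1, bisect_right(prefix, budget_bytes))
--     return "".join(lines[:count])
-- ===== Notes on version B (the rewrite author's own statement) =====
-- stated objective: alternative
-- what changed: B precomputes the cumulative UTF-8 byte lengths with itertools.accumulate and finds the cutoff count via bisect.bisect_right on that prefix-sum table (with max(1, .) keeping the first line), instead of A's single accumulate-and-break loop.
import Mathlib
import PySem

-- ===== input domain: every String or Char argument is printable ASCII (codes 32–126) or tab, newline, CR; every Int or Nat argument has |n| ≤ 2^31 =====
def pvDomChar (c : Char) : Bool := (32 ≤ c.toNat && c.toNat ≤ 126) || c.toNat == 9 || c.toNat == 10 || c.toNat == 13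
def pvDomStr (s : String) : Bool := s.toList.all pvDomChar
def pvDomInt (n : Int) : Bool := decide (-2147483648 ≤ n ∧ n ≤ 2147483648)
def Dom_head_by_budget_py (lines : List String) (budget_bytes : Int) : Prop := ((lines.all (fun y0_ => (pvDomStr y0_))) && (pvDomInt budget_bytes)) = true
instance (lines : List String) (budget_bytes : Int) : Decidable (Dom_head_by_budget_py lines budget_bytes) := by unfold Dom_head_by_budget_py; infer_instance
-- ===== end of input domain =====

-- B replaces A's accumulate-and-break loop by a prefix-sum table cut with bisect_right (alternative decomposition, same cost).

-- len(line.encode('utf-8')) — exact on the stated ASCII/tab/newline/CR domain, where every char is one UTF-8 byte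
def pvUtf8Len (s : String) : Int := PySem.Str.len s

-- ===== PORT A =====
-- the for-loop of A: state (used, out); `break` = return out
def headLoopA (budget : Int) : List String → Int → List String → List String
  | [], _, out => out
  | l :: ls, used, out =>
    let b := pvUtf8Len l
    if used + b > budget ∧ out ≠ [] then out
    else headLoopA budget ls (used + b) (out ++ [l])

def head_by_budget_py (lines : List String) (budget_bytes : Int) : String :=
  PySem.Str.join "" (headLoopA budget_bytes lines 0 [])

-- ===== PORT B =====
-- itertools.accumulate over the byte lengths (running sums)
def pvAccum : List Int → Int → List Int
  | [], _ => []
  | x :: xs, acc => (acc + x) :: pvAccum xs (acc + x)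

def head_by_budget_py_alt (lines : List String) (budget_bytes : Int) : String :=
  let prefixSums := pvAccum (lines.map pvUtf8Len) 0
  let count := max 1 (PySem.List.bisectRight prefixSums budget_bytes)
  PySem.Str.join "" (lines.take count)

-- ===== PRECONDITION & SPEC =====
def Spec_head_by_budget_py (lines : List String) (budget_bytes : Int) (out : String) : Prop := out = head_by_budget_py_alt lines budget_bytes
instance (lines : List String) (budget_bytes : Int) (out : String) : Decidable (Spec_head_by_budget_py lines budget_bytes out) := by unfold Spec_head_by_budget_py; infer_instance

-- ===== CLAIM (what is proved, stated in full; the proofs are below) =====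
def Claim_equal_head_by_budget_py : Prop := ∀ (lines : List String) (budget_bytes : Int), Dom_head_by_budget_py lines budget_bytes → Spec_head_by_budget_py lines budget_bytes (head_by_budget_py lines budget_bytes)

-- ===== LEMMAS AND PROOFS =====

-- proof-side count: how many leading lengths fit greedily, starting from `used`
def cntF (budget : Int) : List Int → Int → Nat
  | [], _ => 0
  | b :: bs, used => if used + b > budget then 0 else 1 + cntF budget bs (used + b)

lemma pvAccum_length (L : List Int) (u : Int) : (pvAccum L u).length = L.length := by
  induction L generalizing u with
  | nil => rfl
  | cons b bs ih => simp [pvAccum, ih]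

lemma pvAccum_ge (L : List Int) (u : Int) (h : ∀ b ∈ L, 0 ≤ b) :
    ∀ y ∈ pvAccum L u, u ≤ y := by
  induction L generalizing u with
  | nil => simp [pvAccum]
  | cons b bs ih =>
    intro y hy
    have hb : 0 ≤ b := h b (by simp)
    simp only [pvAccum, List.mem_cons] at hy
    rcases hy with rfl | hy
    · omega
    · have := ih (u + b) (fun c hc => h c (by simp [hc])) y hy
      omega

lemma pvAccum_sorted (L : List Int) (u : Int) (h : ∀ b ∈ L, 0 ≤ b) :
    List.Pairwise (fun x y => x ≤ y) (pvAccum L u) := by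
  induction L generalizing u with
  | nil => simp [pvAccum]
  | cons b bs ih =>
    refine List.pairwise_cons.mpr ⟨?_, ih (u + b) (fun c hc => h c (by simp [hc]))⟩
    intro y hy
    exact pvAccum_ge bs (u + b) (fun c hc => h c (by simp [hc])) y hy

lemma cntF_le_length (budget : Int) (L : List Int) (u : Int) : cntF budget L u ≤ L.length := by
  induction L generalizing u with
  | nil => simp [cntF]
  | cons b bs ih =>
    simp only [cntF, List.length_cons]
    split_ifs with h
    · omega
    · have := ih (u + b); omega

lemma cntF_lt (budget : Int) (L : List Int) (u : Int) :
    ∀ j (hj : j < (pvAccum L u).length), j < cntF budget L u → (pvAccum L u)[j] ≤ budget := by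
  induction L generalizing u with
  | nil => intro j hj; simp [pvAccum] at hj
  | cons b bs ih =>
    intro j hj hlt
    simp only [cntF] at hlt
    split_ifs at hlt with h
    · omega
    · cases j with
      | zero => simpa [pvAccum] using (by omega : u + b ≤ budget)
      | succ j =>
        have := ih (u + b) j (by simpa [pvAccum, pvAccum_length] using (by simpa [pvAccum, pvAccum_length] using hj)) (by omega)
        simpa [pvAccum] using this

lemma cntF_at (budget : Int) (L : List Int) (u : Int) :
    ∀ (hj : cntF budget L u < (pvAccum L u).length), budget < (pvAccum L u)[cntF budget L u] := by
  induction L generalizing u with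
  | nil => intro hj; simp [pvAccum] at hj
  | cons b bs ih =>
    intro hj
    by_cases h : u + b > budget
    · simp [cntF, h, pvAccum]
    · have hc : cntF budget (b :: bs) u = 1 + cntF budget bs (u + b) := by simp [cntF, h]
      have hj' : cntF budget bs (u + b) < (pvAccum bs (u + b)).length := by
        simp only [hc, pvAccum, List.length_cons] at hj; omega
      have := ih (u + b) hj'
      have hco : cntF budget (b :: bs) u = cntF budget bs (u + b) + 1 := by omega
      simpa [pvAccum, hco] using this

lemma bisect_eq_cntF (budget : Int) (L : List Int) (h : ∀ b ∈ L, 0 ≤ b) :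
    PySem.List.bisectRight (pvAccum L 0) budget = cntF budget L 0 := by
  obtain ⟨hle, hlo, hhi⟩ := PySem.List.bisectRight_spec (pvAccum L 0) budget (pvAccum_sorted L 0 h)
  rcases lt_trichotomy (PySem.List.bisectRight (pvAccum L 0) budget) (cntF budget L 0) with hlt | heq | hgt
  · -- p[k1] > budget (bisect) vs p[k1] ≤ budget (cntF, k1 < k2)
    have hk1len : PySem.List.bisectRight (pvAccum L 0) budget < (pvAccum L 0).length := by
      have := cntF_le_length budget L 0
      rw [pvAccum_length]; omega
    have h1 := hhi _ hk1len le_rfl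
    have h2 := cntF_lt budget L 0 _ hk1len hlt
    omega
  · exact heq
  · -- p[k2] ≤ budget (bisect, k2 < k1) vs p[k2] > budget (cntF)
    have hk2len : cntF budget L 0 < (pvAccum L 0).length := by
      rw [pvAccum_length]
      exact lt_of_lt_of_le hgt (by rwa [pvAccum_length] at hle)
    have h1 := hlo _ hk2len hgt
    have h2 := cntF_at budget L 0 hk2len
    omega

lemma loopA_eq (budget : Int) (ls : List String) :
    ∀ (used : Int) (out : List String), out ≠ [] →
      headLoopA budget ls used out = out ++ ls.take (cntF budget (ls.map pvUtf8Len) used) := by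
  induction ls with
  | nil => intro used out _; simp [headLoopA]
  | cons l ls ih =>
    intro used out hne
    simp only [headLoopA]
    by_cases h : used + pvUtf8Len l > budget
    · simp [h, hne, cntF, List.map]
    · have : ¬ (used + pvUtf8Len l > budget ∧ out ≠ []) := by tauto
      simp only [this, if_false]
      rw [ih (used + pvUtf8Len l) (out ++ [l]) (by simp)]
      simp [cntF, h, List.map, List.take_succ_cons, Nat.add_comm]

lemma pvUtf8Len_nonneg (s : String) : 0 ≤ pvUtf8Len s := by
  simp [pvUtf8Len, PySem.Str.len_eq]

lemma cntF_zero_of_gt (budget : Int) (L : List Int) (u : Int)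
    (h : ∀ b ∈ L, 0 ≤ b) (hu : budget < u) : cntF budget L u = 0 := by
  cases L with
  | nil => rfl
  | cons b bs =>
    have : 0 ≤ b := h b (by simp)
    simp [cntF]; omega

-- ===== VERDICT (by name: the statement is the Claim_ definition above) =====
theorem head_by_budget_py_spec : Claim_equal_head_by_budget_py := by
  intro lines budget _
  unfold Spec_head_by_budget_py head_by_budget_py head_by_budget_py_alt
  congr 1
  have hnn : ∀ b ∈ lines.map pvUtf8Len, 0 ≤ b := by
    intro b hb
    obtain ⟨s, _, rfl⟩ := List.mem_map.mp hb
    exact pvUtf8Len_nonneg s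
  rw [bisect_eq_cntF budget (lines.map pvUtf8Len) hnn]
  cases lines with
  | nil => simp [headLoopA, cntF]
  | cons l ls =>
    have hnn' : ∀ b ∈ ls.map pvUtf8Len, 0 ≤ b := by
      intro b hb
      obtain ⟨s, hs, rfl⟩ := List.mem_map.mp hb
      exact hnn _ (List.mem_map.mpr ⟨s, by simp [hs], rfl⟩)
    simp only [headLoopA, ne_eq, not_true_eq_false, and_false, if_false, List.nil_append,
      List.map, zero_add]
    rw [loopA_eq budget ls (pvUtf8Len l) [l] (by simp)]
    by_cases h : pvUtf8Len l > budget
    · have h1 : cntF budget (ls.map pvUtf8Len) (pvUtf8Len l) = 0 :=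
        cntF_zero_of_gt budget _ _ hnn' h
      have h0 : cntF budget (pvUtf8Len l :: List.map pvUtf8Len ls) 0 = 0 := by
        simp only [cntF, zero_add]; rw [if_pos h]
      rw [h1, h0]; simp
    · have h0 : cntF budget (pvUtf8Len l :: List.map pvUtf8Len ls) 0
          = 1 + cntF budget (ls.map pvUtf8Len) (pvUtf8Len l) := by
        simp only [cntF, zero_add]; rw [if_neg h]
      rw [h0]
      have hmax : max 1 (1 + cntF budget (ls.map pvUtf8Len) (pvUtf8Len l))
          = 1 + cntF budget (ls.map pvUtf8Len) (pvUtf8Len l) := by omega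
      rw [hmax]
      simp [List.take_succ_cons, Nat.add_comm]
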